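-- pv_equiv track=rewrite | github.com/ishay320/research-algorithms | ex4.py | bounded_subset
-- ===== SOURCE A (Python) =====
-- from typing import List
--
-- def bounded_subset(lst:List, cap:int) -> List:
--     '''
--     for every loop generate the next number and yield the number if
--     the sum is less or equals to the cap
--     '''
--     max_size_bit = 2**len(lst)
--
--     for out_loop in range(max_size_bit):
--         results = []
--         lst_sum = 0
--         for in_loop in range(len(lst)):
--             if((out_loop & (1 << in_loop)) > 0):
--                 results.append(lst[in_loop])
--                 lst_sum += lst[in_loop]
--
--         if sum(results) > cap:
--             continue
--
--         yield results
-- ===== SOURCE B (Python) =====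
-- def bounded_subset(lst, cap):
--     # Build the powerset by doubling (same ascending-bitmask order), then filter by cap.
--     subsets = [[]]
--     for x in lst:
--         subsets = subsets + [s + [x] for s in subsets]
--     for s in subsets:
--         if sum(s) <= cap:
--             yield s
-- ===== Notes on version B (the rewrite author's own statement) =====
-- stated objective: idiomatic
-- what changed: Replaces the bitmask counter with its inner bit-test loop by an incremental powerset doubling (subsets = subsets + [s+[x] for s in subsets]) followed by a sum filter, yielding subsets in the same ascending-mask order.
import Mathlib
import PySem

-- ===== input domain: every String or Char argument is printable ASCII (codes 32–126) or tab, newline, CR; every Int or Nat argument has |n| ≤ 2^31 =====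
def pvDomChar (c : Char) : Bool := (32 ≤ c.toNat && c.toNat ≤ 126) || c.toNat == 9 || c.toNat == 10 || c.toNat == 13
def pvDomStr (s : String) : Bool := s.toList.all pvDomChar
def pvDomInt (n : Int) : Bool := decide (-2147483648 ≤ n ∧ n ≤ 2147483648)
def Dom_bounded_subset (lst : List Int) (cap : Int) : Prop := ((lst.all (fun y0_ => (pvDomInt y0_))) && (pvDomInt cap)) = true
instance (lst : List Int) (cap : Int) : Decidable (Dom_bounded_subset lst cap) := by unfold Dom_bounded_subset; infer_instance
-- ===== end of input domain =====

-- B builds the powerset by doubling instead of A's bitmask counter with an inner bit-test loop; equivalence of return values (A is a Python generator, compared as its yielded list).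

-- ===== PORT A =====
-- outer loop over range(2**len(lst)); masks are nonnegative, so Nat range/bit-ops are exact here.
-- inner loop indexes lst[in_loop] with 0 <= in_loop < len(lst), so getD is exact.
def bounded_subset (lst : List Int) (cap : Int) : List (List Int) :=
  (List.range (2 ^ lst.length)).foldl (fun out out_loop =>
    -- results, lst_sum accumulated exactly as in A (lst_sum is computed but unused, as in A)
    let st := (List.range lst.length).foldl
      (fun (st : List Int × Int) in_loop =>
        if Nat.land out_loop (1 <<< in_loop) > 0 then
          (st.1 ++ [lst.getD in_loop 0], st.2 + lst.getD in_loop 0)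
        else st) (([] : List Int), (0 : Int))
    if st.1.sum > cap then out else out ++ [st.1]) []

-- ===== PORT B =====
def bounded_subset_alt (lst : List Int) (cap : Int) : List (List Int) :=
  (lst.foldl (fun acc x => acc ++ acc.map (fun s => s ++ [x])) [[]]).filter
    (fun s => decide (s.sum ≤ cap))

-- ===== PRECONDITION & SPEC =====
def Spec_bounded_subset (lst : List Int) (cap : Int) (out : List (List Int)) : Prop := out = bounded_subset_alt lst cap
instance (lst : List Int) (cap : Int) (out : List (List Int)) : Decidable (Spec_bounded_subset lst cap out) := by unfold Spec_bounded_subset; infer_instance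

-- ===== CLAIM (what is proved, stated in full; the proofs are below) =====
def Claim_equal_bounded_subset : Prop := ∀ (lst : List Int) (cap : Int), Dom_bounded_subset lst cap → Spec_bounded_subset lst cap (bounded_subset lst cap)

-- ===== LEMMAS AND PROOFS =====

-- subset selected from lst by mask m, consuming the mask bit by bit
def pvSel : List Int → Nat → List Int
  | [], _ => []
  | x :: xs, m => (if m.testBit 0 then [x] else []) ++ pvSel xs (m / 2)

-- powerset built by doubling, as in B
def pvPow (lst : List Int) : List (List Int) :=
  lst.foldl (fun acc x => acc ++ acc.map (fun s => s ++ [x])) [[]]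

theorem pv_bittest (m i : Nat) : (Nat.land m (1 <<< i) > 0) ↔ m.testBit i = true := by
  have h : Nat.land m (1 <<< i) = m &&& 2 ^ i := by
    simp [HAnd.hAnd, AndOp.and, Nat.shiftLeft_eq]
  rw [h, Nat.and_two_pow]
  cases hb : m.testBit i
  · simp
  · simp

theorem pv_inner_fold (lst : List Int) (m : Nat) (p : List Int × Int) :
    ((List.range lst.length).foldl
      (fun (st : List Int × Int) i =>
        if Nat.land m (1 <<< i) > 0 then
          (st.1 ++ [lst.getD i 0], st.2 + lst.getD i 0)
        else st) p).1 = p.1 ++ pvSel lst m := by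
  induction lst generalizing m p with
  | nil => simp [pvSel]
  | cons x xs ih =>
    rw [List.length_cons, List.range_succ_eq_map, List.foldl_cons, List.foldl_map]
    have hfun : (fun (st : List Int × Int) i =>
        if Nat.land m (1 <<< (i + 1)) > 0 then
          (st.1 ++ [(x :: xs).getD (i + 1) 0], st.2 + (x :: xs).getD (i + 1) 0)
        else st)
        = (fun (st : List Int × Int) i =>
        if Nat.land (m / 2) (1 <<< i) > 0 then
          (st.1 ++ [xs.getD i 0], st.2 + xs.getD i 0)
        else st) := by
      funext st i
      have : (Nat.land m (1 <<< (i + 1)) > 0) = (Nat.land (m / 2) (1 <<< i) > 0) := by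
        simp only [pv_bittest, Nat.testBit_add_one]
      simp [this]
    simp only [Nat.succ_eq_add_one] at hfun ⊢
    rw [hfun, ih (m / 2)]
    by_cases hb : m.testBit 0 = true
    · rw [if_pos ((pv_bittest m 0).mpr (by simpa using hb))]
      simp [pvSel, hb]
    · rw [if_neg (by rw [pv_bittest]; simpa using hb)]
      simp [pvSel, hb]

theorem pv_sel_append_lt (lst : List Int) (x : Int) (m : Nat) (h : m < 2 ^ lst.length) :
    pvSel (lst ++ [x]) m = pvSel lst m := by
  induction lst generalizing m with
  | nil =>
    have hm0 : m = 0 := by simpa [Nat.lt_one_iff] using h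
    subst hm0
    simp [pvSel]
  | cons y ys ih =>
    have h2 : m / 2 < 2 ^ ys.length := by
      have := pow_succ 2 ys.length
      simp [List.length_cons] at h
      omega
    simp [pvSel, ih (m / 2) h2]

theorem pv_sel_append_ge (lst : List Int) (x : Int) (m : Nat) (h : m < 2 ^ lst.length) :
    pvSel (lst ++ [x]) (2 ^ lst.length + m) = pvSel lst m ++ [x] := by
  induction lst generalizing m with
  | nil =>
    have hm0 : m = 0 := by simpa [Nat.lt_one_iff] using h
    subst hm0
    simp [pvSel]
  | cons y ys ih =>
    have he : (2 : Nat) ^ (ys.length + 1) = 2 * 2 ^ ys.length := by rw [pow_succ]; ring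
    have h' : m < 2 * 2 ^ ys.length := by
      rw [← he]; simpa using h
    have hbit : (2 ^ (ys.length + 1) + m) % 2 = m % 2 := by rw [he, Nat.mul_add_mod]
    have hdiv : (2 ^ (ys.length + 1) + m) / 2 = 2 ^ ys.length + m / 2 := by
      rw [he]; exact Nat.mul_add_div (by norm_num) _ _
    have h2 : m / 2 < 2 ^ ys.length := Nat.div_lt_of_lt_mul h'
    simp [pvSel, Nat.testBit_zero, hbit, hdiv, ih (m / 2) h2]

theorem pv_main (lst : List Int) :
    (List.range (2 ^ lst.length)).map (pvSel lst) = pvPow lst := by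
  induction lst using List.reverseRecOn with
  | nil => simp [pvSel, pvPow]
  | append_singleton lst x ih =>
    have hlen : (lst ++ [x]).length = lst.length + 1 := by simp
    have hpow : 2 ^ (lst ++ [x]).length = 2 ^ lst.length + 2 ^ lst.length := by
      rw [hlen, pow_succ]; ring
    rw [hpow, List.range_add, List.map_append, List.map_map]
    have h1 : (List.range (2 ^ lst.length)).map (pvSel (lst ++ [x]))
        = (List.range (2 ^ lst.length)).map (pvSel lst) := by
      apply List.map_congr_left
      intro m hm
      exact pv_sel_append_lt lst x m (List.mem_range.mp hm)
    have h2 : (List.range (2 ^ lst.length)).map (pvSel (lst ++ [x]) ∘ (2 ^ lst.length + ·))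
        = ((List.range (2 ^ lst.length)).map (pvSel lst)).map (fun s => s ++ [x]) := by
      rw [List.map_map]
      apply List.map_congr_left
      intro m hm
      exact pv_sel_append_ge lst x m (List.mem_range.mp hm)
    rw [h1, h2, ih]
    simp [pvPow, List.foldl_append]

theorem pv_outer (cap : Int) (g : Nat → List Int) (L : List Nat) (acc : List (List Int)) :
    L.foldl (fun out m => if (g m).sum > cap then out else out ++ [g m]) acc
      = acc ++ (L.map g).filter (fun s => decide (s.sum ≤ cap)) := by
  induction L generalizing acc with
  | nil => simp
  | cons m L ih =>
    by_cases h : (g m).sum > cap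
    · simp [ih, h, not_le.mpr h]
    · simp [ih, h, not_lt.mp h]

-- ===== VERDICT (by name: the statement is the Claim_ definition above) =====
theorem bounded_subset_spec : Claim_equal_bounded_subset := by
  intro lst cap _
  show bounded_subset lst cap = bounded_subset_alt lst cap
  unfold bounded_subset bounded_subset_alt
  have hfun : (fun (out : List (List Int)) (out_loop : Nat) =>
      let st := (List.range lst.length).foldl
        (fun (st : List Int × Int) in_loop =>
          if Nat.land out_loop (1 <<< in_loop) > 0 then
            (st.1 ++ [lst.getD in_loop 0], st.2 + lst.getD in_loop 0)
          else st) (([] : List Int), (0 : Int))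
      if st.1.sum > cap then out else out ++ [st.1])
      = (fun (out : List (List Int)) (m : Nat) =>
      if (pvSel lst m).sum > cap then out else out ++ [pvSel lst m]) := by
    funext out m
    simp only [pv_inner_fold, List.nil_append]
  rw [hfun, pv_outer, pv_main]
  simp [pvPow]
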